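-- pv_equiv track=rewrite | github.com/skunnavakkam/advent-of-code-2023 | day13/demo.py | horizontal_value
-- ===== SOURCE A (Python) =====
-- def dist(s1, s2):
--     return sum([0 if c1 == c2 else 1 for (c1, c2) in zip(s1, s2)])
--
-- def horizontal_value(pat, needed_dist = 1):
--     res = 0
--     for i in range(len(pat) - 1):
--         tot_dist = 0
--         for row1, row2 in zip(pat[i + 1:], pat[i::-1]):
--             tot_dist += dist(row1, row2)
--         if tot_dist == needed_dist:
--             res += i + 1
--     return res
-- ===== SOURCE B (Python) =====
-- def _row_dist(r1, r2):
--     return sum([c1 != c2 for c1, c2 in zip(r1, r2)])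
--
-- def horizontal_value(pat, needed_dist=1):
--     n = len(pat)
--     # triangular table over exactly the mirrored pairs (p, q): p < q, p + q odd;
--     # the distance for pair (p, q) is stored at D[q][p // 2]
--     D = [[_row_dist(pat[p], pat[q]) for p in range((q + 1) % 2, q, 2)]
--          for q in range(n)]
--     res = 0
--     for i in range(n - 1):
--         m = min(n - 1 - i, i + 1)
--         if sum(D[i + 1 + k][(i - k) // 2] for k in range(m)) == needed_dist:
--             res += i + 1
--     return res
-- ===== Notes on version B (the rewrite author's own statement) =====
-- stated objective: alternative
-- what changed: B precomputes a triangular row-distance table over exactly the mirrored pairs (p, q) with p < q and p + q odd in one nested pass, then per candidate axis sums table entries at computed index pairs D[i+1+k][(i-k)//2], instead of A's per-axis slicing (pat[i+1:], pat[i::-1]), zipping and rescanning of the rows themselves.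
import Mathlib
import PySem

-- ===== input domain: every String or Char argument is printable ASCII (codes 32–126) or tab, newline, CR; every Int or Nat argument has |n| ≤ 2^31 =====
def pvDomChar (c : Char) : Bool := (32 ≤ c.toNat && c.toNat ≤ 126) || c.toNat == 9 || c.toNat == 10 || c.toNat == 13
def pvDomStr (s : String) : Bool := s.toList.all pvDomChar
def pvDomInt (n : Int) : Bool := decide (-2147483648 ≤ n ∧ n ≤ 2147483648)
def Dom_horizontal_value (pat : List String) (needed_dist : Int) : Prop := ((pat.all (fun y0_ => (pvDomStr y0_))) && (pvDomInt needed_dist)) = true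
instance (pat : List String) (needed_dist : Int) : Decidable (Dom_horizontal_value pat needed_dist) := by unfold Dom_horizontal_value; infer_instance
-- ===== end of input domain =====

-- B precomputes a triangular row-distance table over exactly the mirrored pairs (p, q) with
-- p < q and p + q odd, then sums table entries at computed index pairs per axis, instead of
-- A's per-axis slice/zip rescanning of the rows (objective: alternative).

-- ===== PORT A =====
def pvDist (s1 s2 : String) : Int :=
  ((s1.toList.zip s2.toList).map (fun p => if p.1 == p.2 then (0 : Int) else 1)).sum

def horizontal_value (pat : List String) (needed_dist : Int) : Int :=
  (PySem.List.pyRange 0 ((pat.length : Int) - 1) 1).foldl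
    (fun res i =>
      let tot :=
        ((PySem.List.slice pat (some (i + 1)) none).zip
          ((PySem.List.slice? pat (some i) none (-1)).getD [])).foldl
          (fun t p => t + pvDist p.1 p.2) 0
      if tot = needed_dist then res + (i + 1) else res) 0

-- ===== PORT B =====
def pvDistB (r1 r2 : String) : Int :=
  ((r1.toList.zip r2.toList).map (fun p => if p.1 ≠ p.2 then (1 : Int) else 0)).sum

def horizontal_value_alt (pat : List String) (needed_dist : Int) : Int :=
  let n := pat.length
  let D := (List.range n).map (fun (q : Nat) =>
    (PySem.List.pyRange (PySem.Int.mod ((q : Int) + 1) 2) (q : Int) 2).map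
      (fun p => pvDistB (pat.getD p.toNat "") (pat.getD q "")))
  (List.range (n - 1)).foldl
    (fun res i =>
      let m := min (n - 1 - i) (i + 1)
      if (((List.range m).map
            (fun k => (D.getD (i + 1 + k) []).getD ((i - k) / 2) 0)).sum
          = needed_dist) then res + ((i : Int) + 1) else res) 0

-- ===== PRECONDITION & SPEC =====
def Spec_horizontal_value (pat : List String) (needed_dist : Int) (out : Int) : Prop := out = horizontal_value_alt pat needed_dist
instance (pat : List String) (needed_dist : Int) (out : Int) : Decidable (Spec_horizontal_value pat needed_dist out) := by unfold Spec_horizontal_value; infer_instance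

-- ===== CLAIM (what is proved, stated in full; the proofs are below) =====
def Claim_equal_horizontal_value : Prop := ∀ (pat : List String) (needed_dist : Int), Dom_horizontal_value pat needed_dist → Spec_horizontal_value pat needed_dist (horizontal_value pat needed_dist)

-- ===== LEMMAS AND PROOFS =====

-- two conditional-accumulation folds over range M agree if their tests and increments agree below M
theorem pv_foldl_if_ext (M : Nat) (P Q : Nat → Prop) [DecidablePred P] [DecidablePred Q]
    (v w : Nat → Int) (a : Int)
    (hPQ : ∀ i, i < M → ((P i ↔ Q i) ∧ v i = w i)) :
    (List.range M).foldl (fun res i => if P i then res + v i else res) a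
      = (List.range M).foldl (fun res i => if Q i then res + w i else res) a := by
  induction M with
  | zero => simp
  | succ M ih =>
    rw [List.range_succ, List.foldl_append, List.foldl_append,
        ih (fun i hi => hPQ i (by omega))]
    simp only [List.foldl_cons, List.foldl_nil]
    obtain ⟨h1, h2⟩ := hPQ M (by omega)
    by_cases h : P M
    · rw [if_pos h, if_pos (h1.mp h), h2]
    · rw [if_neg h, if_neg (fun hq => h (h1.mpr hq))]

-- a fold accumulating additions is the initial value plus a sum
theorem pv_foldl_add_sum {α : Type} (l : List α) (g : α → Int) (a : Int) :
    l.foldl (fun t p => t + g p) a = a + (l.map g).sum := by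
  induction l generalizing a with
  | nil => simp
  | cons x xs ih => simp [ih]; ring

theorem pv_dist_eq (s t : String) : pvDist s t = pvDistB s t := by
  unfold pvDist pvDistB
  congr 1
  apply List.map_congr_left
  intro p _
  by_cases h : p.1 = p.2 <;> simp [h]

theorem pv_distB_comm (s t : String) : pvDistB s t = pvDistB t s := by
  unfold pvDistB
  rw [← List.zip_swap s.toList t.toList, List.map_map]
  apply congrArg
  apply List.map_congr_left
  intro p _
  by_cases h : p.1 = p.2 <;> simp [h, Function.comp, eq_comm]

-- value of pat[j::-1] for an in-range nonnegative start
theorem pv_slice?_from_nat {α : Type} (xs : List α) (j : Nat) (d : α) (h : j < xs.length) :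
    PySem.List.slice? xs (some (j : Int)) none (-1)
      = some ((List.range (j + 1)).map (fun k => xs.getD (j - k) d)) := by
  unfold PySem.List.slice? PySem.List.sliceIndices
  have h0 : ¬ ((j : Int) < 0) := by omega
  have hmin : min (j : Int) ((xs.length : Int) - 1) = (j : Int) := by omega
  norm_num [h0, hmin]
  rw [if_pos (by omega : (-1:Int) < (j:Int)), ← List.filterMap_eq_map]
  apply List.filterMap_congr
  intro x hx
  simp only [List.mem_range] at hx
  have h1 : ((j:Int) + -(x:Int)).toNat = j - x := by omega
  have h2 : j - x < xs.length := by omega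
  simp [h1, List.getElem?_eq_getElem h2]

-- the zipped pair list A scans equals B's index pattern
theorem pv_zip_eq_map_range {α : Type} (xs : List α) (j : Nat) (d : α) (hj : j < xs.length) :
    (xs.drop (j + 1)).zip ((List.range (j + 1)).map (fun k => xs.getD (j - k) d))
      = (List.range (min (xs.length - 1 - j) (j + 1))).map
          (fun k => (xs.getD (j + 1 + k) d, xs.getD (j - k) d)) := by
  apply List.ext_getElem
  · simp; omega
  · intro k h1 h2
    simp only [List.length_zip] at h1
    have hk1 : k < xs.length - (j + 1) := by simp at h1; omega
    have hk2 : j + 1 + k < xs.length := by omega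
    have hk3 : j - k < xs.length := by omega
    simp [List.getElem_zip, List.getElem_drop, List.getElem?_eq_getElem hk2,
          List.getElem?_eq_getElem hk3]

-- the table entry for the mirrored pair (i - k, i + 1 + k)
theorem pv_table_entry (pat : List String) (i k : Nat)
    (hk : k < min (pat.length - 1 - i) (i + 1)) :
    (((List.range pat.length).map (fun (q : Nat) =>
        (PySem.List.pyRange (PySem.Int.mod ((q : Int) + 1) 2) (q : Int) 2).map
          (fun p => pvDistB (pat.getD p.toNat "") (pat.getD q "")))).getD
        (i + 1 + k) []).getD ((i - k) / 2) 0
      = pvDistB (pat.getD (i - k) "") (pat.getD (i + 1 + k) "") := by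
  have hq : i + 1 + k < pat.length := by omega
  have hrow : ((List.range pat.length).map (fun (q : Nat) =>
        (PySem.List.pyRange (PySem.Int.mod ((q : Int) + 1) 2) (q : Int) 2).map
          (fun p => pvDistB (pat.getD p.toNat "") (pat.getD q "")))).getD (i + 1 + k) []
      = (PySem.List.pyRange (PySem.Int.mod (((i + 1 + k : Nat) : Int) + 1) 2) ((i + 1 + k : Nat) : Int) 2).map
          (fun p => pvDistB (pat.getD p.toNat "") (pat.getD (i + 1 + k) "")) := by
    rw [List.getD_eq_getElem _ _ (by simpa using hq), List.getElem_map, List.getElem_range]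
  rw [hrow, PySem.List.pyRange_of_pos _ _ (by norm_num : (0:Int) < 2)]
  have hmod : PySem.Int.mod (((i + 1 + k : Nat) : Int) + 1) 2 = (((i - k) % 2 : Nat) : Int) := by
    simp only [PySem.Int.mod, Int.fmod_eq_emod]
    omega
  rw [hmod, if_pos (by omega : (((i - k) % 2 : Nat) : Int) < ((i + 1 + k : Nat) : Int))]
  have hcnt : ((((i + 1 + k : Nat) : Int) - (((i - k) % 2 : Nat) : Int) + 2 - 1) / 2).toNat
      = (i + 1 + k + 1 - (i - k) % 2) / 2 := by omega
  rw [hcnt]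
  have hlt : (i - k) / 2 < (i + 1 + k + 1 - (i - k) % 2) / 2 := by omega
  rw [List.getD_eq_getElem _ _ (by simpa using hlt), List.getElem_map, List.getElem_map,
      List.getElem_range]
  have harg : ((((i - k) % 2 : Nat) : Int) + 2 * (((i - k) / 2 : Nat) : Int)).toNat = i - k := by
    omega
  rw [harg]

-- A's inner per-axis total equals B's table-lookup total
theorem pv_inner_eq (pat : List String) (i : Nat) (hi : i < pat.length - 1) :
    ((PySem.List.slice pat (some ((i : Int) + 1)) none).zip
        ((PySem.List.slice? pat (some (i : Int)) none (-1)).getD [])).foldl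
        (fun t p => t + pvDist p.1 p.2) 0
      = ((List.range (min (pat.length - 1 - i) (i + 1))).map
          (fun k => (((List.range pat.length).map (fun (q : Nat) =>
              (PySem.List.pyRange (PySem.Int.mod ((q : Int) + 1) 2) (q : Int) 2).map
                (fun p => pvDistB (pat.getD p.toNat "") (pat.getD q "")))).getD
              (i + 1 + k) []).getD ((i - k) / 2) 0)).sum := by
  have hi' : i < pat.length := by omega
  have hcast : ((i : Int) + 1) = ((i + 1 : Nat) : Int) := by push_cast; ring
  rw [hcast, PySem.List.slice_from_natCast, pv_slice?_from_nat pat i "" hi',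
      Option.getD_some, pv_zip_eq_map_range pat i "" hi', pv_foldl_add_sum, zero_add,
      List.map_map]
  congr 1
  apply List.map_congr_left
  intro k hk
  simp only [List.mem_range] at hk
  rw [pv_table_entry pat i k hk, Function.comp_apply, pv_dist_eq, pv_distB_comm]

-- ===== VERDICT (by name: the statement is the Claim_ definition above) =====
theorem horizontal_value_spec : Claim_equal_horizontal_value := by
  intro pat needed_dist _
  unfold Spec_horizontal_value horizontal_value horizontal_value_alt
  rw [PySem.List.pyRange_one, List.foldl_map,
      show ((pat.length : Int) - 1 - 0).toNat = pat.length - 1 by omega]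
  apply pv_foldl_if_ext
  intro i hi
  constructor
  · rw [show (0 : Int) + (i : Int) = (i : Int) by ring, pv_inner_eq pat i hi]
  · ring
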